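-- pv_equiv track=rewrite | github.com/netra-systems/zen | scripts/fix_all_syntax_errors.py | fix_missing_indentation
-- ===== SOURCE A (Python) =====
-- def fix_missing_indentation(content: str) -> str:
--     """Fix missing indentation after if statements, etc."""
--     lines = content.split('\n')
--     fixed_lines = []
--
--     for i, line in enumerate(lines):
--         fixed_lines.append(line)
--
--         # Check if line ends with colon (if, for, while, def, class, etc.)
--         if line.strip().endswith(':') and not line.strip().startswith('#'):
--             # Check if next line exists and is not indented
--             if i + 1 < len(lines):
--                 next_line = lines[i + 1]
--                 if next_line.strip() and not next_line.startswith('    ') and not next_line.startswith('\t'):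
--                     # Add proper indentation to next line
--                     lines[i + 1] = '    ' + next_line.lstrip()
--
--     return '\n'.join(lines)
-- ===== SOURCE B (Python) =====
-- def _is_colon_line(line):
--     s = line.strip()
--     return s.endswith(':') and not s.startswith('#')
--
--
-- def fix_missing_indentation(content: str) -> str:
--     """Fix missing indentation after if statements, etc."""
--     lines = content.split('\n')
--     # Stage 1: collect the set of line indices that follow a colon line.
--     targets = {i + 1 for i, line in enumerate(lines) if _is_colon_line(line)}
--     # Stage 2: rewrite exactly the targeted lines that need indentation.
--     return '\n'.join(
--         '    ' + line.lstrip()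
--         if i in targets and line.strip() and not line.startswith('    ')
--            and not line.startswith('\t')
--         else line
--         for i, line in enumerate(lines))
-- ===== Notes on version B (the rewrite author's own statement) =====
-- stated objective: alternative
-- what changed: B is two staged passes: a first pass builds the set of line indices that follow a colon line (based on the original lines), a second pass rewrites exactly the lines whose index is in that set and that lack indentation, instead of A's single index loop that mutates lines[i+1] while iterating.
import Mathlib
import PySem

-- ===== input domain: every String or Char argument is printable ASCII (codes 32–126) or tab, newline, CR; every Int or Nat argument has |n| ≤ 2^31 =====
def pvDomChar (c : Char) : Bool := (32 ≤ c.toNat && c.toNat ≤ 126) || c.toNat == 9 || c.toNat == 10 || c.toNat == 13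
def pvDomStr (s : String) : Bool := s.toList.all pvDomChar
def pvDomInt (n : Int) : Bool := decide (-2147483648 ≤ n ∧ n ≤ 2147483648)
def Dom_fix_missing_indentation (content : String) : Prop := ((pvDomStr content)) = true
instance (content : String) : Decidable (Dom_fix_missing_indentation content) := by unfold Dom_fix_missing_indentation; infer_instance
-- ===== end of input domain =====

-- B replaces A's mutate-while-iterating index loop by two staged passes (collect the index set of lines following a colon line, then rewrite those lines); objective: alternative. Same return value; A's mutation of its local list is not caller-observable.

-- ===== PORT A =====
-- body of A's loop iteration: the conditional mutation of lines[i+1]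
def fixAStep (lines : List String) (i : Nat) (line : String) : List String :=
  if PySem.Str.endswith (PySem.Str.strip line) ":" && !(PySem.Str.startswith (PySem.Str.strip line) "#") then
    if h : i + 1 < lines.length then
      if (PySem.Str.strip lines[i+1] != "") && !(PySem.Str.startswith lines[i+1] "    ") && !(PySem.Str.startswith lines[i+1] "\t") then
        lines.set (i+1) ("    " ++ PySem.Str.lstrip lines[i+1])
      else lines
    else lines
  else lines

-- the step never changes the length (needed for the loop's termination)
theorem fixAStep_length (lines : List String) (i : Nat) (line : String) :
    (fixAStep lines i line).length = lines.length := by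
  unfold fixAStep
  split
  · split
    · split
      · simp
      · rfl
    · rfl
  · rfl

-- A's 'for i, line in enumerate(lines)': i walks the indices of the LIVE list (mutations are seen);
-- fixed_lines is carried exactly as A builds it, though A never reads it back
def fixALoop (lines : List String) (fixed_lines : List String) (i : Nat) : List String :=
  if h : i < lines.length then
    fixALoop (fixAStep lines i lines[i]) (fixed_lines ++ [lines[i]]) (i + 1)
  else lines
termination_by lines.length - i
decreasing_by rw [fixAStep_length]; omega

def fix_missing_indentation (content : String) : String :=
  -- lines = content.split('\n'): sep "\n" ≠ "" so split? is always some; getD [] only discharges the Option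
  PySem.Str.join "\n" (fixALoop ((PySem.Str.split? content "\n").getD []) [] 0)

-- ===== PORT B =====
-- Source B's _is_colon_line
def isColonLine (line : String) : Bool :=
  let s := PySem.Str.strip line
  PySem.Str.endswith s ":" && !(PySem.Str.startswith s "#")

-- stage 1: the set {i + 1 | lines[i] is a colon line}
def fixBTargets (lines : List String) : PySem.Set Int :=
  PySem.Set.ofList (((PySem.List.enumerate lines).filter (fun p => isColonLine p.2)).map (fun p => p.1 + 1))

def fix_missing_indentation_alt (content : String) : String :=
  let lines := (PySem.Str.split? content "\n").getD []
  let targets := fixBTargets lines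
  -- stage 2: rewrite exactly the targeted, unindented, non-blank lines
  PySem.Str.join "\n" ((PySem.List.enumerate lines).map (fun p =>
    if PySem.Set.contains targets p.1 && (PySem.Str.strip p.2 != "")
        && !(PySem.Str.startswith p.2 "    ") && !(PySem.Str.startswith p.2 "\t") then
      "    " ++ PySem.Str.lstrip p.2
    else p.2))

-- ===== PRECONDITION & SPEC =====
def Spec_fix_missing_indentation (content : String) (out : String) : Prop := out = fix_missing_indentation_alt content
instance (content : String) (out : String) : Decidable (Spec_fix_missing_indentation content out) := by unfold Spec_fix_missing_indentation; infer_instance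

-- ===== CLAIM (what is proved, stated in full; the proofs are below) =====
def Claim_equal_fix_missing_indentation : Prop := ∀ (content : String), Dom_fix_missing_indentation content → Spec_fix_missing_indentation content (fix_missing_indentation content)

-- ===== LEMMAS AND PROOFS =====

-- the needs-indent test shared by both programs
def condN (c : String) : Bool :=
  (PySem.Str.strip c != "") && !(PySem.Str.startswith c "    ") && !(PySem.Str.startswith c "\t")

-- A's effect on the tail: each line is adjusted based on the (already adjusted) previous line
def chain (prev : String) : List String → List String
  | [] => []
  | c :: cs =>
      let c' := if isColonLine prev && condN c then "    " ++ PySem.Str.lstrip c else c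
      c' :: chain c' cs

-- stripping is invariant under A's re-indentation
theorem strip_adjust (c : String) :
    PySem.Str.strip ("    " ++ PySem.Str.lstrip c) = PySem.Str.strip c := by
  apply String.toList_inj.mp
  simp only [PySem.Str.toList_strip, PySem.Str.toList_lstrip, String.toList_append]
  have hsp : PySem.Chars.isspace ' ' = true := rfl
  simp [PySem.Chars.strip, PySem.Chars.lstrip, hsp, List.dropWhile_idempotent]

theorem isColonLine_adjust (c : String) : isColonLine ("    " ++ PySem.Str.lstrip c) = isColonLine c := by
  simp [isColonLine, strip_adjust]

-- chain reads its first argument only through isColonLine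
theorem chain_congr (cs : List String) (p q : String) (h : isColonLine p = isColonLine q) :
    chain p cs = chain q cs := by
  cases cs with
  | nil => rfl
  | cons c cs => simp [chain, h]

theorem chain_length (prev : String) (cs : List String) : (chain prev cs).length = cs.length := by
  induction cs generalizing prev with
  | nil => rfl
  | cons c cs ih => simp [chain, ih]

-- pointwise characterisation of A's rewriting: line k of the tail is adjusted iff the ORIGINAL
-- line before it is a colon line and it needs indentation
theorem chain_getElem (cs : List String) (prev : String) (k : Nat) (hk : k < cs.length) :
    (chain prev cs)[k]'(by rw [chain_length]; exact hk) =
      if isColonLine ((prev :: cs)[k]'(by simp; omega)) && condN (cs[k]'hk) then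
        "    " ++ PySem.Str.lstrip (cs[k]'hk)
      else cs[k]'hk := by
  induction cs generalizing prev k with
  | nil => simp at hk
  | cons c cs ih =>
      cases k with
      | zero => simp [chain]
      | succ k =>
          have hk' : k < cs.length := by simpa using hk
          have hcc : chain (if isColonLine prev && condN c then "    " ++ PySem.Str.lstrip c else c) cs
              = chain c cs := by
            split
            · exact chain_congr cs _ c (isColonLine_adjust c)
            · rfl
          simp only [chain, List.getElem_cons_succ]
          rw [List.getElem_of_eq hcc, ih c k hk']

-- membership in B's target set
theorem contains_targets (lines : List String) (j : Int) :
    PySem.Set.contains (fixBTargets lines) j = true ↔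
      ∃ (k : Nat) (hk : k < lines.length), j = (k : Int) + 1 ∧ isColonLine (lines[k]'hk) = true := by
  unfold fixBTargets PySem.Set.contains
  rw [List.contains_iff_mem, PySem.Set.mem_ofList, List.mem_map]
  constructor
  · rintro ⟨p, hp, rfl⟩
    rw [List.mem_filter] at hp
    obtain ⟨hmem, hcol⟩ := hp
    rw [PySem.List.mem_enumerate_iff] at hmem
    obtain ⟨k, hk, rfl⟩ := hmem
    exact ⟨k, hk, by push_cast; ring, by simpa using hcol⟩
  · rintro ⟨k, hk, rfl, hcol⟩
    refine ⟨((k : Int), lines[k]'hk), ?_, rfl⟩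
    rw [List.mem_filter]
    exact ⟨by rw [PySem.List.mem_enumerate_iff]; exact ⟨k, hk, by simp⟩, hcol⟩

theorem contains_targets_succ (lines : List String) (k : Nat) (hk : k < lines.length) :
    PySem.Set.contains (fixBTargets lines) ((k : Int) + 1) = isColonLine (lines[k]'hk) := by
  by_cases h : isColonLine (lines[k]'hk) = true
  · rw [h, (contains_targets lines _).mpr ⟨k, hk, rfl, h⟩]
  · rw [Bool.not_eq_true] at h
    rw [h]
    rw [Bool.eq_false_iff, Ne, contains_targets]
    rintro ⟨k', hk', hkk, hcol⟩
    have : k = k' := by omega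
    subst this
    rw [hcol] at h
    exact Bool.false_ne_true h.symm

theorem contains_targets_zero (lines : List String) :
    PySem.Set.contains (fixBTargets lines) 0 = false := by
  rw [Bool.eq_false_iff, Ne, contains_targets]
  rintro ⟨k, hk, h0, -⟩
  omega

-- B's staged passes compute A's rewritten list
theorem chain_eq_staged (l0 : String) (rest : List String) :
    l0 :: chain l0 rest =
      (PySem.List.enumerate (l0 :: rest) 0).map (fun p =>
        if PySem.Set.contains (fixBTargets (l0 :: rest)) p.1 && (PySem.Str.strip p.2 != "")
            && !(PySem.Str.startswith p.2 "    ") && !(PySem.Str.startswith p.2 "\t") then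
          "    " ++ PySem.Str.lstrip p.2
        else p.2) := by
  apply List.ext_getElem
  · simp [chain_length, PySem.List.length_enumerate]
  · intro k hk hk'
    have hklt : k < rest.length + 1 := by simpa [chain_length] using hk
    rw [List.getElem_map, PySem.List.getElem_enumerate _ _ k (by
      rw [PySem.List.length_enumerate]; simpa using hklt)]
    cases k with
    | zero =>
        simp only [List.getElem_cons_zero, Nat.cast_zero, Int.add_zero, contains_targets_zero,
          Bool.false_and]
        simp
    | succ k =>
        have hkr : k < rest.length := by omega
        have hA : (0 : Int) + ((k : Nat) + 1 : Nat) = (k : Int) + 1 := by push_cast; ring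
        rw [List.getElem_cons_succ, chain_getElem rest l0 k hkr, hA,
          contains_targets_succ (l0 :: rest) k (by simp; omega)]
        simp [condN, Bool.and_assoc]

-- the invariant of A's loop: at index |pre| the prefix pre and lines[i] = cur are final and the
-- rest gets rewritten as chain cur rest; fixed_lines (acc) never influences the result
theorem fixALoop_chain (rest : List String) (pre : List String) (cur : String) (acc : List String) :
    fixALoop (pre ++ cur :: rest) acc pre.length = pre ++ cur :: chain cur rest := by
  induction rest generalizing pre cur acc with
  | nil =>
      have h : pre.length < (pre ++ [cur]).length := by simp
      have hget : (pre ++ [cur])[pre.length]'h = cur := by simp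
      rw [fixALoop, dif_pos h]
      simp only [hget]
      have hstep : fixAStep (pre ++ [cur]) pre.length cur = pre ++ [cur] := by
        unfold fixAStep
        split
        · rw [dif_neg (by simp)]
        · rfl
      rw [hstep, fixALoop, dif_neg (show ¬ (pre.length + 1 < (pre ++ [cur]).length) by simp)]
      simp [chain]
  | cons c cs ih =>
      have h : pre.length < (pre ++ cur :: c :: cs).length := by simp
      have hget : (pre ++ cur :: c :: cs)[pre.length]'h = cur := by simp
      have hn : pre.length + 1 < (pre ++ cur :: c :: cs).length := by simp
      have hnext : (pre ++ cur :: c :: cs)[pre.length + 1]'hn = c := by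
        rw [List.getElem_append_right (by omega)]
        simp
      have hset : (pre ++ cur :: c :: cs).set (pre.length + 1) ("    " ++ PySem.Str.lstrip c)
          = (pre ++ [cur]) ++ ("    " ++ PySem.Str.lstrip c) :: cs := by
        rw [List.set_append_right _ _ (by omega)]
        simp [List.set]
      set c' := if isColonLine cur && condN c then "    " ++ PySem.Str.lstrip c else c with hc'
      have hstep : fixAStep (pre ++ cur :: c :: cs) pre.length cur = (pre ++ [cur]) ++ c' :: cs := by
        unfold fixAStep
        by_cases hA : isColonLine cur
        · rw [if_pos (show (PySem.Str.endswith (PySem.Str.strip cur) ":" && !(PySem.Str.startswith (PySem.Str.strip cur) "#")) = true by simpa [isColonLine] using hA),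
            dif_pos hn]
          simp only [hnext]
          by_cases hN : condN c
          · rw [if_pos (by simpa [condN] using hN), hset, hc']
            simp [hA, hN]
          · rw [if_neg (by simpa [condN] using hN), hc']
            simp [hN]
        · rw [if_neg (by simpa [isColonLine] using hA), hc']
          simp [hA]
      rw [fixALoop, dif_pos h]
      simp only [hget]
      rw [hstep]
      have hlen : pre.length + 1 = (pre ++ [cur]).length := by simp
      rw [hlen, ih (pre ++ [cur]) c' (acc ++ [cur])]
      have hch : chain cur (c :: cs) = c' :: chain c' cs := by
        simp only [chain]
        rw [← hc']
      rw [hch]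
      simp

-- ===== VERDICT (by name: the statement is the Claim_ definition above) =====
theorem fix_missing_indentation_spec : Claim_equal_fix_missing_indentation := by
  intro content _
  unfold Spec_fix_missing_indentation fix_missing_indentation fix_missing_indentation_alt
  cases hL : (PySem.Str.split? content "\n").getD [] with
  | nil =>
      try rw [hL]
      rw [fixALoop]
      simp [PySem.List.enumerate_nil]
  | cons l0 rest =>
      try rw [hL]
      have h0 := fixALoop_chain rest [] l0 []
      simp only [List.nil_append, List.length_nil] at h0
      rw [h0, chain_eq_staged]
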